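-- pv_equiv track=rewrite | github.com/komajun365/competitive_programming | arc/arc039/c/test.py | solve_simple
-- ===== SOURCE A (Python) =====
-- def solve_simple(k,s):
--     done = set()
--     x,y = 0,0
--     done.add((x,y))
--     for si in s:
--         while (x,y) in done:
--             if si == 'L':
--                 x -= 1
--             elif si == 'R':
--                 x += 1
--             elif si == 'D':
--                 y -= 1
--             else:
--                 y += 1
--         done.add((x,y))
--
--     return [x,y]
-- ===== SOURCE B (Python) =====
-- def solve_simple(k, s):
--     # Alternative strategy: instead of sliding cell-by-cell through the visited
--     # set, collect the occupied offsets along the movement ray and take their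
--     # mex (first gap) by a single scan of the sorted offsets.
--     occupied = {(0, 0)}
--     x, y = 0, 0
--     for c in s:
--         if c == 'L':
--             dx, dy = -1, 0
--         elif c == 'R':
--             dx, dy = 1, 0
--         elif c == 'D':
--             dx, dy = 0, -1
--         else:
--             dx, dy = 0, 1
--         if dx != 0:
--             offs = sorted((a - x) * dx for a, b in occupied if b == y and (a - x) * dx >= 0)
--         else:
--             offs = sorted((b - y) * dy for a, b in occupied if a == x and (b - y) * dy >= 0)
--         t = 0
--         for o in offs:
--             if o == t:
--                 t += 1
--         x, y = x + dx * t, y + dy * t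
--         occupied.add((x, y))
--     return [x, y]
-- ===== Notes on version B (the rewrite author's own statement) =====
-- stated objective: alternative
-- what changed: A slides the robot cell by cell, re-testing set membership at every grid cell crossed; B instead collects the occupied offsets along the movement ray and finds the landing spot as their mex by a single scan of the sorted offsets.
import Mathlib
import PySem

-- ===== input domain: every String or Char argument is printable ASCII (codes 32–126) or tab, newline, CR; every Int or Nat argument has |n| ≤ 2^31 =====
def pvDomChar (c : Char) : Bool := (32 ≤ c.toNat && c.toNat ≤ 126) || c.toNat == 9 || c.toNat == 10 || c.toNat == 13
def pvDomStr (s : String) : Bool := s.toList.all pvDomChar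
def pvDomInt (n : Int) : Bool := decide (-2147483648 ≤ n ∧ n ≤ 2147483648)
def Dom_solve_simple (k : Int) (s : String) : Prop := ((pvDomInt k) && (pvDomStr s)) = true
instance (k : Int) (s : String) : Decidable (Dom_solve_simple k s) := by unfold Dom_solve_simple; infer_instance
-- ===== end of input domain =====

-- B re-implements the slide: instead of stepping cell by cell through the visited set,
-- it collects the occupied offsets along the movement ray and takes their mex by one
-- scan of the sorted offsets ('alternative': different algorithm, similar cost).

-- ===== PORT A =====
-- one body of A's inner 'if si == L … else y += 1'
def moveA (si : Char) (x y : Int) : Int × Int :=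
  if si = 'L' then (x - 1, y)
  else if si = 'R' then (x + 1, y)
  else if si = 'D' then (x, y - 1)
  else (x, y + 1)

-- A's inner 'while (x,y) in done' loop, made total by fuel; fuel = |done| + 1 always
-- suffices (lemmas whileA_eq / ray_count_le below), so this is A's loop step for step.
def whileA (si : Char) (done : PySem.Set (Int × Int)) : Nat → Int → Int → Int × Int
  | 0, x, y => (x, y)
  | fuel+1, x, y =>
    if (x, y) ∈ done then
      let p := moveA si x y
      whileA si done fuel p.1 p.2
    else (x, y)

def stepA (st : PySem.Set (Int × Int) × Int × Int) (si : Char) :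
    PySem.Set (Int × Int) × Int × Int :=
  let p := whileA si st.1 (st.1.length + 1) st.2.1 st.2.2
  (PySem.Set.add st.1 p, p)

def solve_simple (k : Int) (s : String) : List Int :=
  let st := s.toList.foldl stepA (PySem.Set.add PySem.Set.empty ((0 : Int), (0 : Int)), 0, 0)
  [st.2.1, st.2.2]

-- ===== PORT B =====
def dirB (c : Char) : Int × Int :=
  if c = 'L' then (-1, 0)
  else if c = 'R' then (1, 0)
  else if c = 'D' then (0, -1)
  else (0, 1)

-- sorted((a-x)*dx for a,b in occupied if b == y and (a-x)*dx >= 0)  (resp. the column case)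
def offsB (occupied : List (Int × Int)) (x y dx dy : Int) : List Int :=
  if dx ≠ 0 then
    PySem.List.sorted
      ((occupied.filter (fun p => p.2 == y && decide ((p.1 - x) * dx ≥ 0))).map
        (fun p => (p.1 - x) * dx)) (fun t => t)
  else
    PySem.List.sorted
      ((occupied.filter (fun p => p.1 == x && decide ((p.2 - y) * dy ≥ 0))).map
        (fun p => (p.2 - y) * dy)) (fun t => t)

-- 't = 0; for o in offs: if o == t: t += 1'
def mexScan (offs : List Int) : Int :=
  offs.foldl (fun t o => if o = t then t + 1 else t) 0

def stepB (st : PySem.Set (Int × Int) × Int × Int) (c : Char) :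
    PySem.Set (Int × Int) × Int × Int :=
  let d := dirB c
  let t := mexScan (offsB st.1 st.2.1 st.2.2 d.1 d.2)
  let x' := st.2.1 + d.1 * t
  let y' := st.2.2 + d.2 * t
  (PySem.Set.add st.1 (x', y'), x', y')

def solve_simple_alt (k : Int) (s : String) : List Int :=
  let st := s.toList.foldl stepB (PySem.Set.ofList [((0 : Int), (0 : Int))], 0, 0)
  [st.2.1, st.2.2]

-- ===== PRECONDITION & SPEC =====
def Spec_solve_simple (k : Int) (s : String) (out : List Int) : Prop := out = solve_simple_alt k s
instance (k : Int) (s : String) (out : List Int) : Decidable (Spec_solve_simple k s out) := by unfold Spec_solve_simple; infer_instance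

-- ===== CLAIM (what is proved, stated in full; the proofs are below) =====
def Claim_equal_solve_simple : Prop := ∀ (k : Int) (s : String), Dom_solve_simple k s → Spec_solve_simple k s (solve_simple k s)

-- ===== LEMMAS AND PROOFS =====

-- (dx,dy) produced by dirB is a unit axis vector
def UnitDir (dx dy : Int) : Prop :=
  (dx = 0 ∧ (dy = 1 ∨ dy = -1)) ∨ (dy = 0 ∧ (dx = 1 ∨ dx = -1))

lemma dirB_unit (c : Char) : UnitDir (dirB c).1 (dirB c).2 := by
  unfold dirB UnitDir; split_ifs <;> simp

lemma moveA_eq_dirB (si : Char) (x y : Int) :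
    moveA si x y = (x + (dirB si).1, y + (dirB si).2) := by
  unfold moveA dirB; split_ifs <;> simp [Prod.ext_iff] <;> ring_nf

-- A's while loop returns the first free cell along the ray, provided such a
-- cell exists within the fuel bound
lemma whileA_eq (si : Char) (done : PySem.Set (Int × Int)) :
    ∀ (n : Nat) (fuel : Nat) (x y : Int), n < fuel →
      (∀ j : Nat, j < n → (x + (dirB si).1 * (j : Int), y + (dirB si).2 * (j : Int)) ∈ done) →
      (x + (dirB si).1 * (n : Int), y + (dirB si).2 * (n : Int)) ∉ done →
      whileA si done fuel x y = (x + (dirB si).1 * (n : Int), y + (dirB si).2 * (n : Int)) := by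
  intro n
  induction n with
  | zero =>
    intro fuel x y hf hocc hfree
    match fuel, hf with
    | fuel + 1, _ =>
      simp only [Nat.cast_zero, mul_zero, add_zero] at hfree ⊢
      unfold whileA
      rw [if_neg hfree]
  | succ n ih =>
    intro fuel x y hf hocc hfree
    match fuel, hf with
    | fuel + 1, hf =>
      have h0 : (x, y) ∈ done := by
        have := hocc 0 (Nat.succ_pos n)
        simpa using this
      unfold whileA
      rw [if_pos h0]
      rw [moveA_eq_dirB]
      have := ih fuel (x + (dirB si).1) (y + (dirB si).2) (by omega)
        (fun j hj => by
          have := hocc (j + 1) (by omega)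
          have e1 : x + (dirB si).1 + (dirB si).1 * (j : Int) = x + (dirB si).1 * ((j : Nat) + 1 : Nat) := by push_cast; ring
          have e2 : y + (dirB si).2 + (dirB si).2 * (j : Int) = y + (dirB si).2 * ((j : Nat) + 1 : Nat) := by push_cast; ring
          rw [e1, e2]; exact this)
        (by
          have e1 : x + (dirB si).1 + (dirB si).1 * (n : Int) = x + (dirB si).1 * ((n : Nat) + 1 : Nat) := by push_cast; ring
          have e2 : y + (dirB si).2 + (dirB si).2 * (n : Int) = y + (dirB si).2 * ((n : Nat) + 1 : Nat) := by push_cast; ring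
          rw [e1, e2]; exact hfree)
      rw [this, Prod.ext_iff]
      constructor <;> (push_cast; ring)

-- consecutive ray cells are pairwise distinct
lemma ray_inj (x y dx dy : Int) (hu : UnitDir dx dy) (n m : Nat)
    (h : (x + dx * (n : Int), y + dy * (n : Int)) = (x + dx * (m : Int), y + dy * (m : Int))) :
    n = m := by
  rw [Prod.ext_iff] at h
  obtain ⟨h1, h2⟩ := h
  rcases hu with ⟨hdx, hdy | hdy⟩ | ⟨hdy, hdx | hdx⟩ <;> subst hdx <;> subst hdy <;> omega

-- pigeonhole: if the first m ray cells are all occupied then m ≤ |done|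
lemma ray_count_le (done : List (Int × Int)) (x y dx dy : Int)
    (hu : UnitDir dx dy) (m : Nat)
    (hocc : ∀ j : Nat, j < m → (x + dx * (j : Int), y + dy * (j : Int)) ∈ done) :
    m ≤ done.length := by
  have hM : ((List.range m).map (fun j : Nat => (x + dx * (j : Int), y + dy * (j : Int)))).Nodup := by
    refine List.Nodup.map_on ?_ (List.nodup_range)
    intro a ha b hb hab
    exact ray_inj x y dx dy hu a b hab
  have hsub : ((List.range m).map (fun j : Nat => (x + dx * (j : Int), y + dy * (j : Int)))) ⊆ done := by
    intro p hp
    simp only [List.mem_map, List.mem_range] at hp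
    obtain ⟨j, hj, rfl⟩ := hp
    exact hocc j hj
  have := (hM.subperm hsub).length_le
  simpa using this

-- membership in B's offset list: exactly the occupied offsets along the ray
lemma mem_offsB (occupied : List (Int × Int)) (x y dx dy : Int) (hu : UnitDir dx dy) (t : Int) :
    t ∈ offsB occupied x y dx dy ↔ 0 ≤ t ∧ (x + dx * t, y + dy * t) ∈ occupied := by
  unfold offsB
  rcases hu with ⟨hdx, hdy | hdy⟩ | ⟨hdy, hdx | hdx⟩ <;> subst hdx <;> subst hdy <;>
    simp only [ne_eq, not_true_eq_false, if_false, if_pos, not_false_eq_true, one_ne_zero,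
      neg_eq_zero] <;>
    rw [(PySem.List.sorted_perm _ _ _).mem_iff] <;>
    simp only [List.mem_map, List.mem_filter, beq_iff_eq, Bool.and_eq_true, decide_eq_true_eq] <;>
    constructor
  · rintro ⟨⟨a, b⟩, ⟨hm, hax, hge⟩, rfl⟩
    refine ⟨by omega, ?_⟩
    have : (x + 0 * ((b - y) * 1), y + 1 * ((b - y) * 1)) = (a, b) := by
      simp only [Prod.ext_iff]; omega
    rw [this]; exact hm
  · rintro ⟨hge, hm⟩
    refine ⟨(x + 0 * t, y + 1 * t), ⟨hm, by omega, by omega⟩, by omega⟩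
  · rintro ⟨⟨a, b⟩, ⟨hm, hax, hge⟩, rfl⟩
    refine ⟨by omega, ?_⟩
    have : (x + 0 * ((b - y) * -1), y + -1 * ((b - y) * -1)) = (a, b) := by
      simp only [Prod.ext_iff]; omega
    rw [this]; exact hm
  · rintro ⟨hge, hm⟩
    refine ⟨(x + 0 * t, y + -1 * t), ⟨hm, by omega, by omega⟩, by omega⟩
  · rintro ⟨⟨a, b⟩, ⟨hm, hay, hge⟩, rfl⟩
    refine ⟨by omega, ?_⟩
    have : (x + 1 * ((a - x) * 1), y + 0 * ((a - x) * 1)) = (a, b) := by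
      simp only [Prod.ext_iff]; omega
    rw [this]; exact hm
  · rintro ⟨hge, hm⟩
    refine ⟨(x + 1 * t, y + 0 * t), ⟨hm, by omega, by omega⟩, by omega⟩
  · rintro ⟨⟨a, b⟩, ⟨hm, hay, hge⟩, rfl⟩
    refine ⟨by omega, ?_⟩
    have : (x + -1 * ((a - x) * -1), y + 0 * ((a - x) * -1)) = (a, b) := by
      simp only [Prod.ext_iff]; omega
    rw [this]; exact hm
  · rintro ⟨hge, hm⟩
    refine ⟨(x + -1 * t, y + 0 * t), ⟨hm, by omega, by omega⟩, by omega⟩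

-- B's offset list is strictly increasing
lemma offsB_sorted (occupied : List (Int × Int)) (hnd : occupied.Nodup) (x y dx dy : Int)
    (hu : UnitDir dx dy) : (offsB occupied x y dx dy).Pairwise (· < ·) := by
  have key : ∀ (l : List Int), l.Nodup → (PySem.List.sorted l (fun t => t)).Pairwise (· < ·) := by
    intro l hl
    have hle := PySem.List.sorted_pairwise l (fun t => t)
    have hne : (PySem.List.sorted l (fun t => t)).Nodup :=
      ((PySem.List.sorted_perm l (fun t => t) false).nodup_iff).mpr hl
    exact (List.Pairwise.and hne hle).imp (fun h => lt_of_le_of_ne h.2 h.1)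
  unfold offsB
  rcases hu with ⟨hdx, hdy | hdy⟩ | ⟨hdy, hdx | hdx⟩ <;> subst hdx <;> subst hdy <;>
      simp only [ne_eq, not_true_eq_false, if_false, not_false_eq_true, one_ne_zero,
        neg_eq_zero, if_pos] <;>
      apply key <;>
      refine List.Nodup.map_on ?_ (hnd.filter _) <;>
      rintro ⟨a, b⟩ ha ⟨a', b'⟩ hb hab <;>
      simp only [List.mem_filter, beq_iff_eq, Bool.and_eq_true, decide_eq_true_eq] at ha hb <;>
      simp only [Prod.ext_iff] <;> omega

-- the scan never moves below its start value
lemma mexfold_ge (L : List Int) : ∀ (a : Int),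
    a ≤ L.foldl (fun t o => if o = t then t + 1 else t) a := by
  induction L with
  | nil => intro a; simp
  | cons o tl ih =>
    intro a
    simp only [List.foldl_cons]
    split
    · exact le_trans (by omega) (ih (a + 1))
    · exact ih a

-- the scan of a strictly increasing list computes the mex above the start value
lemma mexfold_spec (L : List Int) : ∀ (a : Int), L.Pairwise (· < ·) → (∀ o ∈ L, a ≤ o) →
    L.foldl (fun t o => if o = t then t + 1 else t) a ∉ L ∧
      (∀ j : Int, a ≤ j → j < L.foldl (fun t o => if o = t then t + 1 else t) a → j ∈ L) := by
  induction L with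
  | nil =>
    intro a _ _
    refine ⟨by simp, ?_⟩
    intro j h1 h2
    simp only [List.foldl_nil] at h2
    omega
  | cons o tl ih =>
    intro a hs hge
    have hs' : tl.Pairwise (· < ·) := hs.of_cons
    have hgt : ∀ o' ∈ tl, o < o' := by
      intro o' ho'; exact (List.pairwise_cons.mp hs).1 o' ho'
    simp only [List.foldl_cons]
    by_cases h : o = a
    · subst h
      simp only [if_pos]
      obtain ⟨h1, h2⟩ := ih (o + 1) hs' (fun o' ho' => by have := hgt o' ho'; omega)
      refine ⟨?_, ?_⟩
      · intro hmem
        rcases List.mem_cons.mp hmem with h | h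
        · have hge2 := mexfold_ge tl (o + 1)
          rw [h] at hge2; omega
        · exact h1 h
      · intro j hj1 hj2
        by_cases hjo : j = o
        · exact hjo ▸ List.mem_cons_self
        · exact List.mem_cons_of_mem _ (h2 j (by omega) hj2)
    · rw [if_neg h]
      have hao : a < o := lt_of_le_of_ne (hge o List.mem_cons_self) (fun he => h he.symm)
      obtain ⟨h1, h2⟩ := ih a hs' (fun o' ho' => le_of_lt (lt_trans hao (hgt o' ho')))
      have hfa : tl.foldl (fun t o => if o = t then t + 1 else t) a = a := by
        -- if the fold moved, a itself would be in tl, impossible: tl's elements exceed o > a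
        by_contra hne
        have hlt : a < tl.foldl (fun t o => if o = t then t + 1 else t) a :=
          lt_of_le_of_ne (mexfold_ge tl a) (Ne.symm hne)
        have : a ∈ tl := h2 a le_rfl hlt
        have := hgt a this; omega
      rw [hfa]
      refine ⟨?_, ?_⟩
      · intro hmem
        rcases List.mem_cons.mp hmem with h' | h'
        · omega
        · have := hgt a h'; omega
      · intro j hj1 hj2; omega

-- the two per-character steps agree: both land on the first free ray cell
lemma step_eq (st : PySem.Set (Int × Int) × Int × Int) (hnd : st.1.Nodup) (c : Char) :
    stepA st c = stepB st c := by
  obtain ⟨done, x, y⟩ := st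
  simp only [stepA, stepB]
  have hnd' : done.Nodup := hnd
  set dx := (dirB c).1 with hdx
  set dy := (dirB c).2 with hdy
  have hu : UnitDir dx dy := dirB_unit c
  set offs := offsB done x y dx dy with hoffs
  set m := mexScan offs with hm
  have hsorted : offs.Pairwise (· < ·) := offsB_sorted done hnd' x y dx dy hu
  have hge : ∀ o ∈ offs, (0:Int) ≤ o := fun o ho => ((mem_offsB done x y dx dy hu o).mp ho).1
  obtain ⟨hnotmem, hbelow⟩ := mexfold_spec offs 0 hsorted hge
  have hm0 : 0 ≤ m := mexfold_ge offs 0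
  -- the ray cell at m is free
  have hfree : (x + dx * m, y + dy * m) ∉ done := by
    intro hmem
    exact hnotmem ((mem_offsB done x y dx dy hu m).mpr ⟨hm0, hmem⟩)
  -- all ray cells below m are occupied
  have hocc : ∀ j : Nat, (j : Int) < m → (x + dx * (j : Int), y + dy * (j : Int)) ∈ done := by
    intro j hj
    exact ((mem_offsB done x y dx dy hu (j:Int)).mp (hbelow _ (by positivity) hj)).2
  have hcast : ((m.toNat : Nat) : Int) = m := Int.toNat_of_nonneg hm0
  have hlen : m.toNat ≤ done.length := by
    apply ray_count_le done x y dx dy hu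
    intro j hj
    exact hocc j (by omega)
  have := whileA_eq c done m.toNat (done.length + 1) x y (by omega)
    (fun j hj => hocc j (by omega))
    (by rw [hcast]; exact hfree)
  rw [← hdx, ← hdy, hcast] at this
  simp only [Prod.ext_iff]
  rw [this]
  simp

lemma fold_eq (cs : List Char) (st : PySem.Set (Int × Int) × Int × Int) (hnd : st.1.Nodup) :
    cs.foldl stepA st = cs.foldl stepB st := by
  induction cs generalizing st with
  | nil => rfl
  | cons c cs ih =>
    simp only [List.foldl_cons]
    rw [step_eq st hnd c]
    refine ih (stepB st c) ?_
    show ((PySem.Set.add st.1 _ : PySem.Set (Int × Int))).Nodup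
    exact PySem.Set.nodup_add _ _ hnd

-- ===== VERDICT (by name: the statement is the Claim_ definition above) =====
theorem solve_simple_spec : Claim_equal_solve_simple := by
  intro k s _
  unfold Spec_solve_simple solve_simple solve_simple_alt
  have hinit : (PySem.Set.add PySem.Set.empty ((0 : Int), (0 : Int)), (0 : Int), (0 : Int))
      = ((PySem.Set.ofList [((0 : Int), (0 : Int))] : PySem.Set (Int × Int)), (0 : Int), (0 : Int)) := by decide
  rw [hinit, fold_eq s.toList _ (by decide)]
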